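-- pv_equiv track=rewrite | github.com/Jasonleonardvolk/caviar | python/core/intent_driven_reasoning.py | _summarize_conflicts
-- ===== SOURCE A (Python) =====
-- from typing import Any, Dict, List, Optional, Tuple
--
-- def _summarize_conflicts(conflicts: List[Dict[str, Any]]) -> str:
--     """Summarize conflicts in human-readable form."""
--     if not conflicts:
--         return "No conflicts"
--
--     high_severity = sum(1 for c in conflicts if c.get('severity') == 'high')
--     medium_severity = sum(1 for c in conflicts if c.get('severity') == 'medium')
--     low_severity = sum(1 for c in conflicts if c.get('severity') == 'low')
--
--     parts = []
--     if high_severity: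
--         parts.append(f"{high_severity} critical")
--     if medium_severity:
--         parts.append(f"{medium_severity} moderate")
--     if low_severity:
--         parts.append(f"{low_severity} minor")
--
--     return f"Resolved {', '.join(parts)} conflicts"
-- ===== SOURCE B (Python) =====
-- from typing import Any, Dict, List, Optional, Tuple
--
-- def _summarize_conflicts(conflicts: List[Dict[str, Any]]) -> str:
--     """Summarize conflicts in human-readable form (one pass, branching tally)."""
--     if not conflicts:
--         return "No conflicts"
--
--     high = medium = low = 0
--     for c in conflicts:
--         s = c.get('severity')
--         if s == 'high':
--             high += 1
--         elif s == 'medium':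
--             medium += 1
--         elif s == 'low':
--             low += 1
--
--     parts = [f"{n} {label}"
--              for n, label in ((high, "critical"), (medium, "moderate"), (low, "minor"))
--              if n]
--     return f"Resolved {', '.join(parts)} conflicts"
-- ===== Notes on version B (the rewrite author's own statement) =====
-- stated objective: alternative
-- what changed: Replaces A's three separate generator-expression scans (one per severity) and sequential if-append part building with a single pass keeping three counters in a branching tally, and builds the parts list by one comprehension over literal (count,label) pairs.
import Mathlib
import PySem

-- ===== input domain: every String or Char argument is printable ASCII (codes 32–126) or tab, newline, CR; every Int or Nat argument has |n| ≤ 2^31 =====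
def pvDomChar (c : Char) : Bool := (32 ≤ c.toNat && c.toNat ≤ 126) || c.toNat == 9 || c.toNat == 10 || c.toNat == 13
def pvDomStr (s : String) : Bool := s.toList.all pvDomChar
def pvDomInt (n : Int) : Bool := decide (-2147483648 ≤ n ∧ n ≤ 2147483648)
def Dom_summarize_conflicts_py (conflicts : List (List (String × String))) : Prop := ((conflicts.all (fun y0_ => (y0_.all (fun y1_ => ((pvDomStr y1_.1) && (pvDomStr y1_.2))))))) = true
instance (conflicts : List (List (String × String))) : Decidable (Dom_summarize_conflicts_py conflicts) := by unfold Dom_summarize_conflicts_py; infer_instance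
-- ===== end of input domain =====

-- B replaces A's three per-severity scans and sequential if-appends with one branching-tally pass
-- over three counters and a comprehension over literal (count,label) pairs; objective: alternative, same cost.

-- shared construct: c.get('severity') on an assoc-list dict (Python's dict.get)
def pvGetSeverity (c : List (String × String)) : Option String :=
  (PySem.Dict.ofList c).get? "severity"

-- ===== PORT A =====
def summarize_conflicts_py (conflicts : List (List (String × String))) : String :=
  if conflicts = [] then "No conflicts"
  else
    -- sum(1 for c in conflicts if c.get('severity') == '…'), one scan per severity
    let high_severity : Int :=
      conflicts.foldl (fun acc c => if pvGetSeverity c = some "high" then acc + 1 else acc) 0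
    let medium_severity : Int :=
      conflicts.foldl (fun acc c => if pvGetSeverity c = some "medium" then acc + 1 else acc) 0
    let low_severity : Int :=
      conflicts.foldl (fun acc c => if pvGetSeverity c = some "low" then acc + 1 else acc) 0
    let parts : List String := []
    let parts := if high_severity ≠ 0 then parts ++ [PySem.Int.toStr high_severity ++ " critical"] else parts
    let parts := if medium_severity ≠ 0 then parts ++ [PySem.Int.toStr medium_severity ++ " moderate"] else parts
    let parts := if low_severity ≠ 0 then parts ++ [PySem.Int.toStr low_severity ++ " minor"] else parts
    "Resolved " ++ PySem.Str.join ", " parts ++ " conflicts"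

-- ===== PORT B =====
-- one pass: if s == 'high': high += 1 elif s == 'medium': medium += 1 elif s == 'low': low += 1
def pvTallyStep (st : Int × Int × Int) (c : List (String × String)) : Int × Int × Int :=
  let s := pvGetSeverity c
  if s = some "high" then (st.1 + 1, st.2.1, st.2.2)
  else if s = some "medium" then (st.1, st.2.1 + 1, st.2.2)
  else if s = some "low" then (st.1, st.2.1, st.2.2 + 1)
  else st

def summarize_conflicts_py_alt (conflicts : List (List (String × String))) : String :=
  if conflicts = [] then "No conflicts"
  else
    let tally := conflicts.foldl pvTallyStep (0, 0, 0)
    -- parts = [f"{n} {label}" for n, label in ((high,"critical"),(medium,"moderate"),(low,"minor")) if n]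
    let parts : List String :=
      [(tally.1, "critical"), (tally.2.1, "moderate"), (tally.2.2, "minor")].filterMap
        (fun p => if p.1 ≠ 0 then some (PySem.Int.toStr p.1 ++ " " ++ p.2) else none)
    "Resolved " ++ PySem.Str.join ", " parts ++ " conflicts"

-- ===== PRECONDITION & SPEC =====
def Spec_summarize_conflicts_py (conflicts : List (List (String × String))) (out : String) : Prop := out = summarize_conflicts_py_alt conflicts
instance (conflicts : List (List (String × String))) (out : String) : Decidable (Spec_summarize_conflicts_py conflicts out) := by unfold Spec_summarize_conflicts_py; infer_instance

-- ===== CLAIM (what is proved, stated in full; the proofs are below) =====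
def Claim_equal_summarize_conflicts_py : Prop := ∀ (conflicts : List (List (String × String))), Dom_summarize_conflicts_py conflicts → Spec_summarize_conflicts_py conflicts (summarize_conflicts_py conflicts)

-- ===== LEMMAS AND PROOFS =====

-- B's single branching pass computes exactly A's three per-severity scan results
theorem pv_tally_eq_scans (conflicts : List (List (String × String))) (h m l : Int) :
    conflicts.foldl pvTallyStep (h, m, l)
      = (conflicts.foldl (fun acc c => if pvGetSeverity c = some "high" then acc + 1 else acc) h,
         conflicts.foldl (fun acc c => if pvGetSeverity c = some "medium" then acc + 1 else acc) m,
         conflicts.foldl (fun acc c => if pvGetSeverity c = some "low" then acc + 1 else acc) l) := by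
  induction conflicts generalizing h m l with
  | nil => rfl
  | cons c rest ih =>
    simp only [List.foldl_cons]
    by_cases hh : pvGetSeverity c = some "high"
    · simp [pvTallyStep, hh, ih]
    · by_cases hm : pvGetSeverity c = some "medium"
      · simp [pvTallyStep, hh, hm, ih]
      · by_cases hl : pvGetSeverity c = some "low"
        · simp [pvTallyStep, hh, hl, ih]
        · simp [pvTallyStep, hh, hm, hl, ih]

-- ===== VERDICT (by name: the statement is the Claim_ definition above) =====
theorem summarize_conflicts_py_spec : Claim_equal_summarize_conflicts_py := by
  intro conflicts _
  unfold Spec_summarize_conflicts_py summarize_conflicts_py summarize_conflicts_py_alt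
  by_cases h : conflicts = []
  · simp [h]
  · simp only [h, if_false, pv_tally_eq_scans]
    set H := conflicts.foldl (fun acc c => if pvGetSeverity c = some "high" then acc + 1 else acc) (0 : Int)
    set M := conflicts.foldl (fun acc c => if pvGetSeverity c = some "medium" then acc + 1 else acc) (0 : Int)
    set L := conflicts.foldl (fun acc c => if pvGetSeverity c = some "low" then acc + 1 else acc) (0 : Int)
    by_cases hH : H ≠ 0 <;> by_cases hM : M ≠ 0 <;> by_cases hL : L ≠ 0 <;>
      simp [hH, hM, hL, List.filterMap, String.append_assoc]
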